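-- pv_equiv track=rewrite | github.com/davweb/adventofcode2017 | advent/year2020/day24.py | moves_for_line
-- ===== SOURCE A (Python) =====
-- def moves_for_line(line):
--     steps = []
--     previous = None
--
--     for c in line:
--         if c in ['n', 's']:
--             if previous is not None:
--                 raise ValueError()
--             previous = c
--
--         elif c in ['e', 'w']:
--             if previous is None:
--                 steps.append(c)
--             else:
--                 steps.append("{}{}".format(previous, c))
--
--             previous = None
--
--     return steps
-- ===== SOURCE B (Python) =====
-- def moves_for_line(line):
--     stream = [c for c in line if c in 'nsew']
--     steps = []
--     i = 0
--     n = len(stream)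
--     while i < n:
--         c = stream[i]
--         if c in 'ew':
--             steps.append(c)
--             i += 1
--         elif i + 1 == n:
--             i += 1
--         elif stream[i + 1] in 'ew':
--             steps.append(c + stream[i + 1])
--             i += 2
--         else:
--             raise ValueError()
--     return steps
-- ===== Notes on version B (the rewrite author's own statement) =====
-- stated objective: alternative
-- what changed: A single pass with a pending-prefix flag is replaced by filtering the line to its 'nsew' characters first and then walking that stream with a one-character lookahead that consumes one or two characters per step.
import Mathlib
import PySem

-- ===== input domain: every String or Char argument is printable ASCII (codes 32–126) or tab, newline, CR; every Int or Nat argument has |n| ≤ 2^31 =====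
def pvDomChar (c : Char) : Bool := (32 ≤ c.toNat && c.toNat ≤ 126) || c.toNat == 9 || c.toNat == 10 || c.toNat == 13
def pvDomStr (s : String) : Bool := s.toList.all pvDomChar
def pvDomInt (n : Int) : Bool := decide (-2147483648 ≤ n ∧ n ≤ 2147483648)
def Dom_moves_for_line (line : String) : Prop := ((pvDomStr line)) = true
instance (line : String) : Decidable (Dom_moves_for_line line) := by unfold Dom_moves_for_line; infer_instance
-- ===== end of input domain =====

-- B replaces A's previous-flag scan by a filter-then-lookahead walk over the relevant characters (alternative decomposition, same cost).
-- Pre_ excludes exactly the inputs on which A raises ValueError (two adjacent n/s among the characters drawn from 'nsew').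


-- ===== PORT A =====
-- the loop over the line, carrying 'previous'; the 'raise ValueError()' branch
-- (previous is not None and c is n/s) is outside Pre_ and returns [] here
def pvLoopA : List Char → Option Char → List String
  | [], _ => []
  | c :: rest, prev =>
    if c == 'n' || c == 's' then
      match prev with
      | some _ => []          -- raise ValueError(): excluded by Pre_
      | none => pvLoopA rest (some c)
    else if c == 'e' || c == 'w' then
      (match prev with
       | none => String.ofList [c]
       | some p => String.ofList [p, c]) :: pvLoopA rest none
    else pvLoopA rest prev

def moves_for_line (line : String) : List String := pvLoopA line.toList none

-- ===== PORT B =====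
-- B first filters line to the characters in 'nsew' …
def pvRelChar (c : Char) : Bool := c == 'n' || c == 's' || c == 'e' || c == 'w'

def pvRelevant (line : String) : List Char := line.toList.filter pvRelChar

-- … then walks that stream with lookahead, consuming one or two characters per
-- step; the 'raise ValueError()' branch returns [] here (outside Pre_)
def pvWalkB : List Char → List String
  | [] => []
  | c :: rest =>
    if c == 'e' || c == 'w' then String.ofList [c] :: pvWalkB rest
    else
      match rest with
      | [] => []              -- trailing n/s prefix is dropped
      | d :: rest2 =>
        if d == 'e' || d == 'w' then String.ofList [c, d] :: pvWalkB rest2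
        else []               -- raise ValueError(): excluded by Pre_

def moves_for_line_alt (line : String) : List String := pvWalkB (pvRelevant line)

-- ===== PRECONDITION & SPEC =====
def pvIsPfx (c : Char) : Bool := c == 'n' || c == 's'

def pvNoAdj : List Char → Bool
  | a :: b :: rest => (!(pvIsPfx a && pvIsPfx b)) && pvNoAdj (b :: rest)
  | _ => true

-- Pre_ excludes exactly the inputs on which A raises ValueError: two adjacent
-- n/s characters in the subsequence of characters drawn from 'nsew'.
def Pre_moves_for_line (line : String) : Prop := pvNoAdj (pvRelevant line) = true
instance (line : String) : Decidable (Pre_moves_for_line line) := by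
  unfold Pre_moves_for_line; infer_instance

def pvWitness_moves_for_line : String := "esenee"

def Spec_moves_for_line (line : String) (out : List String) : Prop := out = moves_for_line_alt line
instance (line : String) (out : List String) : Decidable (Spec_moves_for_line line out) := by unfold Spec_moves_for_line; infer_instance

-- ===== CLAIM (what is proved, stated in full; the proofs are below) =====
def Claim_equal_moves_for_line : Prop := ∀ (line : String), Dom_moves_for_line line → Pre_moves_for_line line → Spec_moves_for_line line (moves_for_line line)

-- ===== LEMMAS AND PROOFS =====
lemma pvNoAdj_tail {a : Char} {l : List Char} (h : pvNoAdj (a :: l) = true) :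
    pvNoAdj l = true := by
  cases l with
  | nil => rfl
  | cons b rest => simp [pvNoAdj] at h; exact h.2

lemma pvPfx_not_ew {c : Char} (h : pvIsPfx c = true) : (c == 'e' || c == 'w') = false := by
  simp [pvIsPfx] at h
  rcases h with h | h <;> simp [h]

-- main invariant: A's loop with pending prefix 'prev' equals B's walk of
-- 'prev' prepended to the filtered remainder, given no adjacent n/s there
lemma pvLoop_eq_walk (l : List Char) :
    ∀ (prev : Option Char), (∀ p, prev = some p → pvIsPfx p = true) →
    pvNoAdj (prev.toList ++ l.filter pvRelChar) = true →
    pvLoopA l prev = pvWalkB (prev.toList ++ l.filter pvRelChar) := by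
  induction l with
  | nil =>
    intro prev hp _
    cases prev with
    | none => simp [pvLoopA, pvWalkB]
    | some p =>
      have := pvPfx_not_ew (hp p rfl)
      simp [pvLoopA, pvWalkB, this]
  | cons c rest ih
  => intro prev hp hch
     by_cases hns : (c == 'n' || c == 's') = true
     · have hrel : pvRelChar c = true := by simp [pvRelChar, hns]
       have hf : (c :: rest).filter pvRelChar = c :: rest.filter pvRelChar := by
         simp [List.filter_cons, hrel]
       cases prev with
       | none =>
         rw [hf] at hch ⊢
         simpa [pvLoopA, hns] using
           ih (some c) (by intro p hpe; cases hpe; simpa [pvIsPfx] using hns) hch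
       | some p =>
         exfalso
         rw [hf] at hch
         have hpfx : pvIsPfx p = true := hp p rfl
         have hcfx : pvIsPfx c = true := by simpa [pvIsPfx] using hns
         simp [pvNoAdj, hpfx, hcfx] at hch
     · by_cases hew : (c == 'e' || c == 'w') = true
       · have hrel : pvRelChar c = true := by
           simp [pvRelChar] at *; tauto
         have hf : (c :: rest).filter pvRelChar = c :: rest.filter pvRelChar := by
           simp [List.filter_cons, hrel]
         cases prev with
         | none =>
           rw [hf] at hch ⊢
           simp only [Option.toList, List.nil_append] at *
           rw [show pvLoopA (c :: rest) none = String.ofList [c] :: pvLoopA rest none by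
                 simp [pvLoopA, hns, hew]]
           rw [show pvWalkB (c :: rest.filter pvRelChar)
                 = String.ofList [c] :: pvWalkB (rest.filter pvRelChar) by
                 rw [pvWalkB.eq_def]; simp [hew]]
           exact congrArg _ (ih none (by intro p hpe; cases hpe) (pvNoAdj_tail hch))
         | some p =>
           rw [hf] at hch ⊢
           have hpfx : pvIsPfx p = true := hp p rfl
           have hpew := pvPfx_not_ew hpfx
           rw [show pvLoopA (c :: rest) (some p)
                 = String.ofList [p, c] :: pvLoopA rest none by simp [pvLoopA, hns, hew]]
           rw [show pvWalkB ((some p).toList ++ c :: rest.filter pvRelChar)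
                 = String.ofList [p, c] :: pvWalkB (rest.filter pvRelChar) by
                 rw [pvWalkB.eq_def]; simp [hpew, hew]]
           exact congrArg _ (ih none (by intro p hpe; cases hpe)
             (pvNoAdj_tail (pvNoAdj_tail hch)))
       · have hrel : pvRelChar c = false := by
           simp [pvRelChar] at *; tauto
         have hf : (c :: rest).filter pvRelChar = rest.filter pvRelChar := by
           simp [List.filter_cons, hrel]
         rw [hf] at hch ⊢
         rw [show pvLoopA (c :: rest) prev = pvLoopA rest prev by simp [pvLoopA, hns, hew]]
         exact ih prev hp hch

-- ===== VERDICT (by name: the statement is the Claim_ definition above) =====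
theorem moves_for_line_spec : Claim_equal_moves_for_line := by
  intro line _ hpre
  show moves_for_line line = moves_for_line_alt line
  unfold moves_for_line moves_for_line_alt pvRelevant
  simpa using pvLoop_eq_walk line.toList none (by intro p h; cases h)
    (by simpa [pvRelevant] using hpre)
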